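-- pv_equiv track=rewrite | github.com/nicepyprod/csv-surgeon | csv_surgeon/shift.py | lead_column
-- ===== SOURCE A (Python) =====
-- from typing import Iterator, Dict, List, Optional
-- from collections import deque
--
-- def lead_column(
--     rows: Iterator[Dict[str, str]],
--     column: str,
--     periods: int = 1,
--     out_column: Optional[str] = None,
--     fill: str = "",
-- ) -> Iterator[Dict[str, str]]:
--     """Add a column containing the value of *column* from *periods* rows ahead."""
--     if periods < 1:
--         raise ValueError("periods must be >= 1")
--     out = out_column or f"{column}_lead{periods}"
--     buf: deque = deque()
--     pending: List[Dict[str, str]] = []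
--
--     for row in rows:
--         buf.append(row.get(column, ""))
--         pending.append(row)
--         if len(buf) > periods:
--             lead_val = buf[periods] if len(buf) > periods else fill
--             yield {**pending[0], out: buf[periods]}
--             pending.pop(0)
--             buf.popleft()
--
--     # flush remaining rows with fill
--     for row in pending:
--         yield {**row, out: fill}
-- ===== SOURCE B (Python) =====
-- from typing import Iterator, Dict, List, Optional
--
--
-- def lead_column(
--     rows: Iterator[Dict[str, str]],
--     column: str,
--     periods: int = 1,
--     out_column: Optional[str] = None,
--     fill: str = "",
-- ) -> Iterator[Dict[str, str]]:
--     """Add a column containing the value of *column* from *periods* rows ahead."""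
--     if periods < 1:
--         raise ValueError("periods must be >= 1")
--     out = out_column or f"{column}_lead{periods}"
--     data = list(rows)
--     n = len(data)
--     for i, row in enumerate(data):
--         if i + periods < n:
--             yield {**row, out: data[i + periods].get(column, "")}
--         else:
--             yield {**row, out: fill}
-- ===== Notes on version B (the rewrite author's own statement) =====
-- stated objective: simpler
-- what changed: Replaces A's sliding deque/pending-buffer machinery with deferred emission and a final flush by one indexed pass over the materialized row list that looks up the lead value by random access (data[i+periods] when in range, else fill).
import Mathlib
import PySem

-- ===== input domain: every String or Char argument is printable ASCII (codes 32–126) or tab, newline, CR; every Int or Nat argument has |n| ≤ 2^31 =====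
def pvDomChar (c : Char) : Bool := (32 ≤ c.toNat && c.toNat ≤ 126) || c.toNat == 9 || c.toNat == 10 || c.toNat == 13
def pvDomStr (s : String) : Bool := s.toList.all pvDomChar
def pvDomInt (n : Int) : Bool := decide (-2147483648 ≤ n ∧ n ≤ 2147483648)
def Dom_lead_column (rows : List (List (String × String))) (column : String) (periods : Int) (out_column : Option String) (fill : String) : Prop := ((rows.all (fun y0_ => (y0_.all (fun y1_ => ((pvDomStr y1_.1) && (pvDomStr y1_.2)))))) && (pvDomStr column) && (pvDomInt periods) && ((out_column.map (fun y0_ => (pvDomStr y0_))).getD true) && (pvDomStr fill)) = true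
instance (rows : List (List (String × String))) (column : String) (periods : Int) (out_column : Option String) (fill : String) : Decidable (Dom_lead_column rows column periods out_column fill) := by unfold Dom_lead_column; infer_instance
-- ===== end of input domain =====

-- B replaces A's sliding deque/pending buffers and deferred flush with a single indexed
-- pass over the materialized list using random-access look-ahead (objective: simpler).

-- ===== PORT A =====

-- {**row, out: v} : overwrite `out` in place or append it
def pvMkRow (out : String) (row : List (String × String)) (v : String) : List (String × String) :=
  (PySem.Dict.insert (PySem.Dict.mk row) out v).items

-- the out = out_column or f"{column}_lead{periods}" line ('' is falsy)
def pvOutName (column : String) (periods : Int) (out_column : Option String) : String :=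
  let dflt := column ++ "_lead" ++ PySem.Int.toStr periods
  match out_column with
  | some s => if s = "" then dflt else s
  | none => dflt

-- A's for-loop: state (buf, pending, acc); acc holds the rows yielded so far;
-- on exhaustion the pending rows are flushed with fill.
def leadLoopA (column out fill : String) (periods : Int) :
    List (List (String × String)) → List String → List (List (String × String)) →
    List (List (String × String)) → List (List (String × String))
  | [], _buf, pending, acc => acc ++ pending.map (fun row => pvMkRow out row fill)
  | r :: rest, buf, pending, acc =>
    let buf' := buf ++ [PySem.Dict.getD (PySem.Dict.mk r) column ""]
    let pending' := pending ++ [r]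
    if periods < (buf'.length : Int) then
      -- pending'[0] and buf'[periods] are in range here (buf' nonempty, periods < len)
      leadLoopA column out fill periods rest buf'.tail pending'.tail
        (acc ++ [pvMkRow out pending'.headI ((PySem.List.pyGet? buf' periods).getD "")])
    else
      leadLoopA column out fill periods rest buf' pending' acc

def lead_column (rows : List (List (String × String))) (column : String) (periods : Int) (out_column : Option String) (fill : String) : List (List (String × String)) :=
  if periods < 1 then [] -- Python raises ValueError here; excluded by Pre_
  else
    let out := pvOutName column periods out_column
    leadLoopA column out fill periods rows [] [] []

-- ===== PORT B =====

def lead_column_alt (rows : List (List (String × String))) (column : String) (periods : Int) (out_column : Option String) (fill : String) : List (List (String × String)) :=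
  if periods < 1 then [] -- Python raises ValueError here; excluded by Pre_
  else
    let out := pvOutName column periods out_column
    let n := rows.length
    (PySem.List.enumerate rows).map (fun p =>
      if p.1 + periods < (n : Int) then
        -- data[i + periods] is in range by the guard
        pvMkRow out p.2 (PySem.Dict.getD (PySem.Dict.mk (rows.getD (p.1 + periods).toNat [])) column "")
      else
        pvMkRow out p.2 fill)

-- ===== PRECONDITION & SPEC =====
-- A raises ValueError when periods < 1; Pre_ excludes exactly those inputs.
def Pre_lead_column (rows : List (List (String × String))) (column : String) (periods : Int) (out_column : Option String) (fill : String) : Prop := 1 ≤ periods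
instance (rows : List (List (String × String))) (column : String) (periods : Int) (out_column : Option String) (fill : String) : Decidable (Pre_lead_column rows column periods out_column fill) := by unfold Pre_lead_column; infer_instance
def pvWitness_lead_column : (List (List (String × String))) × String × Int × Option String × String :=
  ([[("a", "1")], [("a", "2")], [("b", "3")]], "a", 1, none, "")

def Spec_lead_column (rows : List (List (String × String))) (column : String) (periods : Int) (out_column : Option String) (fill : String) (out : List (List (String × String))) : Prop := out = lead_column_alt rows column periods out_column fill
instance (rows : List (List (String × String))) (column : String) (periods : Int) (out_column : Option String) (fill : String) (out : List (List (String × String))) : Decidable (Spec_lead_column rows column periods out_column fill out) := by unfold Spec_lead_column; infer_instance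

-- ===== CLAIM (what is proved, stated in full; the proofs are below) =====
def Claim_equal_lead_column : Prop := ∀ (rows : List (List (String × String))) (column : String) (periods : Int) (out_column : Option String) (fill : String), Dom_lead_column rows column periods out_column fill → Pre_lead_column rows column periods out_column fill → Spec_lead_column rows column periods out_column fill (lead_column rows column periods out_column fill)

-- ===== LEMMAS AND PROOFS =====

-- Common reference function: for each suffix r :: t of the input, the emitted row is
-- r extended with (r :: t)[p] 's column value if that index exists, else fill.
def specL (column out fill : String) (p : Nat) : List (List (String × String)) → List (List (String × String))
  | [] => []
  | r :: t =>
    pvMkRow out r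
      (if p < (r :: t).length then PySem.Dict.getD (PySem.Dict.mk ((r :: t).getD p [])) column "" else fill)
      :: specL column out fill p t

theorem specL_of_short (column out fill : String) (p : Nat)
    (l : List (List (String × String))) (h : l.length ≤ p) :
    specL column out fill p l = l.map (fun row => pvMkRow out row fill) := by
  induction l with
  | nil => rfl
  | cons r t ih =>
    simp only [specL, List.map_cons]
    rw [if_neg (by simpa using h), ih (by simpa using Nat.le_of_succ_le h)]

theorem leadLoopA_eq_specL (column out fill : String) (periods : Int) (p : Nat)
    (hp : 1 ≤ p) (hpp : (p : Int) = periods)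
    (rest pending : List (List (String × String))) (acc : List (List (String × String)))
    (hlen : pending.length ≤ p) :
    leadLoopA column out fill periods rest (pending.map (fun r => PySem.Dict.getD (PySem.Dict.mk r) column "")) pending acc
      = acc ++ specL column out fill p (pending ++ rest) := by
  induction rest generalizing pending acc with
  | nil =>
    simp only [leadLoopA, List.append_nil]
    rw [specL_of_short column out fill p pending hlen]
  | cons r rest ih =>
    simp only [leadLoopA]
    have hbuf : (pending.map (fun r => PySem.Dict.getD (PySem.Dict.mk r) column "")) ++ [PySem.Dict.getD (PySem.Dict.mk r) column ""]
        = (pending ++ [r]).map (fun r => PySem.Dict.getD (PySem.Dict.mk r) column "") := by simp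
    by_cases hfull : pending.length = p
    · obtain ⟨h0, t0, rfl⟩ : ∃ h0 t0, pending = h0 :: t0 := by
        cases pending with
        | nil => exact absurd hfull (by simpa using (by omega : ¬ 0 = p))
        | cons a b => exact ⟨a, b, rfl⟩
      have hfl : p = t0.length + 1 := by
        simp only [List.length_cons] at hfull; omega
      have hcond : periods < (((h0 :: t0).map (fun r => PySem.Dict.getD (PySem.Dict.mk r) column "") ++ [PySem.Dict.getD (PySem.Dict.mk r) column ""]).length : Int) := by
        simp only [List.length_append, List.length_map, List.length_cons]
        omega
      rw [if_pos hcond]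
      -- buf'[periods] = getc r
      have hget : (PySem.List.pyGet? (((h0 :: t0).map (fun r => PySem.Dict.getD (PySem.Dict.mk r) column "")) ++ [PySem.Dict.getD (PySem.Dict.mk r) column ""]) periods).getD ""
          = PySem.Dict.getD (PySem.Dict.mk r) column "" := by
        rw [← hpp, PySem.List.pyGet?_natCast]
        rw [List.getElem?_append_right (by simp [hfl])]
        simp [hfl]
      rw [hget]
      have htail : (((h0 :: t0).map (fun r => PySem.Dict.getD (PySem.Dict.mk r) column "")) ++ [PySem.Dict.getD (PySem.Dict.mk r) column ""]).tail
          = (t0 ++ [r]).map (fun r => PySem.Dict.getD (PySem.Dict.mk r) column "") := by simp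
      have htail2 : ((h0 :: t0) ++ [r]).tail = t0 ++ [r] := by simp
      rw [htail, htail2]
      rw [ih (t0 ++ [r]) _ (by simp [hfl])]
      -- specL on (h0 :: t0) ++ r :: rest peels h0 with value getc r
      have hidx : (((h0 :: t0) ++ r :: rest).getD p []) = r := by
        have hsome : ((h0 :: t0) ++ r :: rest)[p]? = some r := by
          rw [List.getElem?_append_right (by simp [hfl])]
          simp [hfl]
        simp only [List.cons_append] at hsome
        simp [List.getD, hsome]
      have hcons : (h0 :: t0) ++ r :: rest = h0 :: (t0 ++ r :: rest) := by simp
      rw [hcons]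
      simp only [specL]
      rw [if_pos (by simp only [List.length_cons, List.length_append]; omega), ← hcons, hidx]
      simp [List.append_assoc]
    · have hlt : pending.length < p := lt_of_le_of_ne hlen hfull
      have hcond : ¬ periods < (((pending.map (fun r => PySem.Dict.getD (PySem.Dict.mk r) column "")) ++ [PySem.Dict.getD (PySem.Dict.mk r) column ""]).length : Int) := by
        simp only [List.length_append, List.length_map, List.length_singleton]
        omega
      rw [if_neg hcond, hbuf, ih (pending ++ [r]) acc (by simp; omega)]
      simp

theorem alt_map_eq_specL (rows : List (List (String × String))) (column out fill : String)
    (periods : Int) (p : Nat) (hp : 1 ≤ p) (hpp : (p : Int) = periods)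
    (l : List (List (String × String))) (k : Nat) (hdrop : rows.drop k = l) :
    (PySem.List.enumerate l (k : Int)).map (fun q =>
        if q.1 + periods < (rows.length : Int) then
          pvMkRow out q.2 (PySem.Dict.getD (PySem.Dict.mk (rows.getD (q.1 + periods).toNat [])) column "")
        else pvMkRow out q.2 fill)
      = specL column out fill p l := by
  induction l generalizing k with
  | nil => simp [PySem.List.enumerate, specL]
  | cons r t ih =>
    have hk : k < rows.length := by
      by_contra h
      rw [List.drop_eq_nil_of_le (by omega)] at hdrop
      exact (List.cons_ne_nil r t) hdrop.symm
    have hlen : rows.length = k + 1 + t.length := by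
      have := congrArg List.length hdrop
      simp at this
      omega
    rw [PySem.List.enumerate_cons, List.map_cons]
    have hnat : ((k : Int) + periods).toNat = k + p := by omega
    have hcond : ((k : Int) + periods < (rows.length : Int)) ↔ (p < (r :: t).length) := by
      simp only [List.length_cons]
      omega
    have hdrop' : rows.drop (k + 1) = t := by
      have : rows.drop (k + 1) = (rows.drop k).drop 1 := by
        rw [List.drop_drop]
      rw [this, hdrop]; rfl
    simp only [specL]
    congr 1
    · by_cases hc : p < (r :: t).length
      · rw [if_pos (hcond.mpr hc), if_pos hc, hnat]
        congr 3
        have : rows[k + p]? = (r :: t)[p]? := by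
          rw [← hdrop, List.getElem?_drop]
        simp [List.getD, this]
      · rw [if_neg (fun h => hc (hcond.mp h)), if_neg hc]
    · have : ((k : Int) + 1) = ((k + 1 : Nat) : Int) := by push_cast; ring
      rw [this, ih (k + 1) hdrop']

-- ===== VERDICT (by name: the statement is the Claim_ definition above) =====
theorem lead_column_spec : Claim_equal_lead_column := by
  intro rows column periods out_column fill _ hpre
  unfold Pre_lead_column at hpre
  unfold Spec_lead_column lead_column lead_column_alt
  rw [if_neg (by omega), if_neg (by omega)]
  have hpp : ((periods.toNat : Nat) : Int) = periods := Int.toNat_of_nonneg (by omega)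
  have hp : 1 ≤ periods.toNat := by omega
  have hA := leadLoopA_eq_specL column (pvOutName column periods out_column) fill periods periods.toNat hp hpp rows [] [] (by simp)
  simp only [List.map_nil, List.nil_append] at hA
  rw [hA]
  have hB := alt_map_eq_specL rows column (pvOutName column periods out_column) fill periods periods.toNat hp hpp rows 0 (by simp)
  simp only [Nat.cast_zero] at hB
  rw [hB]
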